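-- pv_equiv track=rewrite | github.com/lucaquaglia15/EcoRPCchem | analysis/SEM/SEM.py | filter_spurious_peaks
-- ===== SOURCE A (Python) =====
-- def filter_spurious_peaks(peakList, peakValues, bounds, valid_lines, tol=20):
--     new_peakList = []
--     new_peakValues = []
--     new_bounds = []
--
--     for idx, val, bnd in zip(peakList, peakValues, bounds):
--         if any(abs(val - e) <= tol for e in valid_lines):
--             new_peakList.append(idx)
--             new_peakValues.append(val)
--             new_bounds.append(bnd)
--
--     return new_peakList, new_peakValues, new_bounds
-- ===== SOURCE B (Python) =====
-- def filter_spurious_peaks(peakList, peakValues, bounds, valid_lines, tol=20):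
--     lines = sorted(valid_lines)
--     n = len(lines)
--
--     def near(v):
--         # binary search for the first line >= v, then check the two neighbours
--         lo, hi = 0, n
--         while lo < hi:
--             mid = (lo + hi) // 2
--             if lines[mid] < v:
--                 lo = mid + 1
--             else:
--                 hi = mid
--         return (lo < n and lines[lo] - v <= tol) or (lo > 0 and v - lines[lo - 1] <= tol)
--
--     kept = [t for t in zip(peakList, peakValues, bounds) if near(t[1])]
--     return [t[0] for t in kept], [t[1] for t in kept], [t[2] for t in kept]
-- ===== Notes on version B (the rewrite author's own statement) =====
-- stated objective: alternative
-- what changed: Instead of scanning all valid_lines for every peak, B sorts valid_lines once and binary-searches the first line >= each peak value, deciding membership from the two neighbouring lines; kept triples are collected by one filter and unzipped.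
import Mathlib
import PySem

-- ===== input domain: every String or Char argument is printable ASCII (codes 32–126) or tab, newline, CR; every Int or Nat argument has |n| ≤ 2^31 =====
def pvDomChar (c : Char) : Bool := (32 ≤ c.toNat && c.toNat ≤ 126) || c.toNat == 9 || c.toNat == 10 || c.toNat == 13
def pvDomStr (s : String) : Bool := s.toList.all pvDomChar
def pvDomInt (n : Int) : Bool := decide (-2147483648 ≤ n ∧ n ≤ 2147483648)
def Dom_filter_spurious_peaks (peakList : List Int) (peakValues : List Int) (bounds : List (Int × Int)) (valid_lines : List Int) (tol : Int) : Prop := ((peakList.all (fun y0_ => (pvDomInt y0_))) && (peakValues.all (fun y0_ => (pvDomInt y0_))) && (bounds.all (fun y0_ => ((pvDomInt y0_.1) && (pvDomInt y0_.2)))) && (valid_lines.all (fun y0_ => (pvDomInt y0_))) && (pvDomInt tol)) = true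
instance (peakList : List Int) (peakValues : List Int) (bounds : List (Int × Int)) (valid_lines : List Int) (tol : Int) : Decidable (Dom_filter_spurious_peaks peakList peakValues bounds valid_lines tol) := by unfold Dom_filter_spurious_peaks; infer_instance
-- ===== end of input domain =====

-- B replaces A's per-peak linear scan of valid_lines by a one-time sort plus a binary search
-- for the first line >= each peak value (objective: alternative algorithm, same observable result).

-- ===== PORT A =====
-- A's loop over zip(peakList, peakValues, bounds) appending to three accumulator lists.
def filter_spurious_peaks (peakList : List Int) (peakValues : List Int) (bounds : List (Int × Int)) (valid_lines : List Int) (tol : Int) : List Int × List Int × (List (Int × Int)) :=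
  (peakList.zip (peakValues.zip bounds)).foldl
    (fun acc t =>
      if valid_lines.any (fun e => decide (|t.2.1 - e| ≤ tol)) then
        (acc.1 ++ [t.1], acc.2.1 ++ [t.2.1], acc.2.2 ++ [t.2.2])
      else acc)
    ([], [], [])

-- ===== PORT B =====
-- the hand-written bisect_left loop of Source B's `near`; the index `mid` is always < hi ≤ n,
-- so `getD _ 0` is exact for Python's lines[mid], and Nat `/ 2` on lo+hi ≥ 0 is exact for `// 2`.
def pvBisect (lines : List Int) (v : Int) (lo hi : Nat) : Nat :=
  if _h : lo < hi then
    let mid := (lo + hi) / 2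
    if lines.getD mid 0 < v then pvBisect lines v (mid + 1) hi
    else pvBisect lines v lo mid
  else lo
termination_by hi - lo
decreasing_by all_goals omega

-- Source B's `near(v)`: the two-neighbour check after the binary search.
def pvNear (lines : List Int) (n : Nat) (tol v : Int) : Bool :=
  let lo := pvBisect lines v 0 n
  (decide (lo < n) && decide (lines.getD lo 0 - v ≤ tol)) ||
  (decide (0 < lo) && decide (v - lines.getD (lo - 1) 0 ≤ tol))

def filter_spurious_peaks_alt (peakList : List Int) (peakValues : List Int) (bounds : List (Int × Int)) (valid_lines : List Int) (tol : Int) : List Int × List Int × (List (Int × Int)) :=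
  let lines := PySem.List.sorted valid_lines (fun x => x) false
  let n := lines.length
  let kept := (peakList.zip (peakValues.zip bounds)).filter (fun t => pvNear lines n tol t.2.1)
  (kept.map (fun t => t.1), kept.map (fun t => t.2.1), kept.map (fun t => t.2.2))

-- ===== PRECONDITION & SPEC =====
def Spec_filter_spurious_peaks (peakList : List Int) (peakValues : List Int) (bounds : List (Int × Int)) (valid_lines : List Int) (tol : Int) (out : List Int × List Int × (List (Int × Int))) : Prop := out = filter_spurious_peaks_alt peakList peakValues bounds valid_lines tol
instance (peakList : List Int) (peakValues : List Int) (bounds : List (Int × Int)) (valid_lines : List Int) (tol : Int) (out : List Int × List Int × (List (Int × Int))) : Decidable (Spec_filter_spurious_peaks peakList peakValues bounds valid_lines tol out) := by unfold Spec_filter_spurious_peaks; infer_instance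

-- ===== CLAIM (what is proved, stated in full; the proofs are below) =====
def Claim_equal_filter_spurious_peaks : Prop := ∀ (peakList : List Int) (peakValues : List Int) (bounds : List (Int × Int)) (valid_lines : List Int) (tol : Int), Dom_filter_spurious_peaks peakList peakValues bounds valid_lines tol → Spec_filter_spurious_peaks peakList peakValues bounds valid_lines tol (filter_spurious_peaks peakList peakValues bounds valid_lines tol)

-- ===== LEMMAS AND PROOFS =====

-- sorted access is monotone in the index
theorem getD_mono_of_pairwise (lines : List Int) (hp : lines.Pairwise (· ≤ ·))
    {i j : Nat} (hij : i ≤ j) (hj : j < lines.length) :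
    lines.getD i 0 ≤ lines.getD j 0 := by
  rcases Nat.eq_or_lt_of_le hij with rfl | h
  · exact le_refl _
  · rw [List.getD_eq_getElem _ _ (lt_of_le_of_lt hij hj), List.getD_eq_getElem _ _ hj]
    exact List.pairwise_iff_getElem.mp hp i j (lt_of_le_of_lt hij hj) hj h

-- binary-search invariant: everything left of the result is < v, everything right is ≥ v
theorem pvBisect_inv (lines : List Int) (v : Int) (lo hi : Nat)
    (hp : lines.Pairwise (· ≤ ·)) (hlo : lo ≤ hi) (hhi : hi ≤ lines.length)
    (h1 : ∀ j, j < lo → lines.getD j 0 < v)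
    (h2 : ∀ j, hi ≤ j → j < lines.length → v ≤ lines.getD j 0) :
    pvBisect lines v lo hi ≤ lines.length ∧
    (∀ j, j < pvBisect lines v lo hi → lines.getD j 0 < v) ∧
    (∀ j, pvBisect lines v lo hi ≤ j → j < lines.length → v ≤ lines.getD j 0) := by
  unfold pvBisect
  split
  · next h =>
    simp only []
    split
    · next hmid =>
      refine pvBisect_inv lines v ((lo + hi) / 2 + 1) hi hp (by omega) hhi ?_ h2
      intro j hj
      rcases Nat.lt_or_ge j lo with hjlo | hjlo
      · exact h1 j hjlo
      · exact lt_of_le_of_lt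
          (getD_mono_of_pairwise lines hp (by omega) (by omega)) hmid
    · next hmid =>
      refine pvBisect_inv lines v lo ((lo + hi) / 2) hp (by omega) (by omega) h1 ?_
      intro j hj hjlen
      rcases Nat.lt_or_ge j hi with hjhi | hjhi
      · exact le_trans (le_of_not_gt hmid)
          (getD_mono_of_pairwise lines hp hj hjlen)
      · exact h2 j hjhi hjlen
  · next h =>
    exact ⟨by omega, h1, fun j hj hjlen => h2 j (by omega) hjlen⟩
termination_by hi - lo
decreasing_by all_goals omega

-- `near` answers exactly "some line is within tol of v"
theorem pvNear_eq (lines : List Int) (tol v : Int) (hp : lines.Pairwise (· ≤ ·)) :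
    pvNear lines lines.length tol v = lines.any (fun e => decide (|v - e| ≤ tol)) := by
  obtain ⟨hle, hlt, hge⟩ := pvBisect_inv lines v 0 lines.length hp (Nat.zero_le _) le_rfl
    (fun j hj => absurd hj (Nat.not_lt_zero j)) (fun j hj hjlen => absurd hjlen (by omega))
  rw [Bool.eq_iff_iff]
  simp only [pvNear, Bool.or_eq_true, Bool.and_eq_true, decide_eq_true_eq, List.any_eq_true]
  constructor
  · rintro (⟨h1, h2⟩ | ⟨h1, h2⟩)
    · refine ⟨lines.getD (pvBisect lines v 0 lines.length) 0, ?_, ?_⟩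
      · rw [List.getD_eq_getElem _ _ h1]; exact List.getElem_mem _
      · have := hge _ le_rfl h1
        rw [abs_le]; omega
    · refine ⟨lines.getD (pvBisect lines v 0 lines.length - 1) 0, ?_, ?_⟩
      · rw [List.getD_eq_getElem _ _ (by omega)]; exact List.getElem_mem _
      · have := hlt _ (Nat.sub_lt h1 Nat.one_pos)
        rw [abs_le]; omega
  · rintro ⟨e, he, htol⟩
    obtain ⟨j, hj, rfl⟩ := List.mem_iff_getElem.mp he
    rw [abs_le] at htol
    have hjD : lines[j] = lines.getD j 0 := (List.getD_eq_getElem _ _ hj).symm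
    by_cases hjr : j < pvBisect lines v 0 lines.length
    · right
      have hjv := hlt j hjr
      have hm := getD_mono_of_pairwise lines hp
        (Nat.le_sub_one_of_lt hjr) (by omega)
      exact ⟨by omega, by omega⟩
    · left
      have hjv := hge j (by omega) hj
      have hm := getD_mono_of_pairwise lines hp (Nat.le_of_not_lt hjr) hj
      exact ⟨by omega, by omega⟩

-- A's accumulator loop is filter + unzip
theorem foldl_filter_unzip (p : Int × Int × (Int × Int) → Bool)
    (ts : List (Int × Int × (Int × Int))) (a b : List Int) (c : List (Int × Int)) :
    ts.foldl (fun acc t => if p t then (acc.1 ++ [t.1], acc.2.1 ++ [t.2.1], acc.2.2 ++ [t.2.2]) else acc) (a, b, c)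
      = (a ++ (ts.filter p).map (fun t => t.1), b ++ (ts.filter p).map (fun t => t.2.1), c ++ (ts.filter p).map (fun t => t.2.2)) := by
  induction ts generalizing a b c with
  | nil => simp
  | cons t ts ih =>
    by_cases h : p t <;> simp [h, ih, List.append_assoc]

-- ===== VERDICT (by name: the statement is the Claim_ definition above) =====
theorem filter_spurious_peaks_spec : Claim_equal_filter_spurious_peaks := by
  intro peakList peakValues bounds valid_lines tol _
  unfold Spec_filter_spurious_peaks filter_spurious_peaks filter_spurious_peaks_alt
  have hp : (PySem.List.sorted valid_lines (fun x => x) false).Pairwise (· ≤ ·) := by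
    simpa using PySem.List.sorted_pairwise valid_lines (fun x => x)
  have hperm : (PySem.List.sorted valid_lines (fun x => x) false).Perm valid_lines :=
    PySem.List.sorted_perm valid_lines (fun x => x) false
  rw [foldl_filter_unzip]
  have hpred : (fun t : Int × Int × (Int × Int) =>
      valid_lines.any (fun e => decide (|t.2.1 - e| ≤ tol)))
        = (fun t => pvNear (PySem.List.sorted valid_lines (fun x => x) false)
            (PySem.List.sorted valid_lines (fun x => x) false).length tol t.2.1) := by
    funext t
    rw [pvNear_eq _ _ _ hp, hperm.any_eq]
  rw [hpred]
  simp only [List.nil_append]
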